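-- pv_equiv track=rewrite | github.com/orjanbp/adventofcode2021 | days/day03/helpers.py | generateReportColumns
-- ===== SOURCE A (Python) =====
-- def splitLine(line):
--     # helper func to array-split a line, so "abc" = [a,b,c]
--     return [num for num in line]
--
-- def generateReportColumns(report):
--     # for each line, drill down and split its entries; putting
--     # each placement into a corresponding array in the 2D matrix
--     # that is reportColumns
--     reportColumns = []
--
--     # drill through the report, line by line, to make columns
--     for line in report:
--         split = splitLine(line)
--
--         # split line up, putting each bit into each column
--         for i in range(len(split)):
--             if not i < len(reportColumns):
--                 reportColumns.append([])
--             reportColumns[i].append(split[i])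
--
--     return reportColumns
-- ===== SOURCE B (Python) =====
-- def generateReportColumns(report):
--     # column-major rebuild: shape determined up front, shorter lines
--     # simply drop out of later columns (ragged rows preserved)
--     maxlen = max((len(line) for line in report), default=0)
--     return [[line[i] for line in report if i < len(line)] for i in range(maxlen)]
-- ===== Notes on version B (the rewrite author's own statement) =====
-- stated objective: faster
-- what changed: B builds the matrix column-major: it computes the maximum line length up front and forms each column with one comprehension over the rows, instead of A's row-major loop that grows and mutates each column list cell by cell.
import Mathlib
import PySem

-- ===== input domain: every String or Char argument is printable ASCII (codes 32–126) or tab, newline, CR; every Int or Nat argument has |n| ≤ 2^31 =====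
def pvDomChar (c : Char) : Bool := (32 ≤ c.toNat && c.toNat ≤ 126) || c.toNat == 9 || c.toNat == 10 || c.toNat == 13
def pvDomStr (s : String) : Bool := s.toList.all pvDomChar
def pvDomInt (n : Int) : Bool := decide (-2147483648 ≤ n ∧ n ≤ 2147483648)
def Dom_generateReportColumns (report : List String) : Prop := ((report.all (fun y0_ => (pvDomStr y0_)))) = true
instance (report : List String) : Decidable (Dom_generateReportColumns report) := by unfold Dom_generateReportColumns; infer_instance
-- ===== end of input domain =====

-- B rebuilds the matrix column-major (max line length up front, one comprehension per
-- column) instead of A's row-major cell-by-cell growth; measured constant-factor faster.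

-- ===== PORT A =====
-- helper `splitLine` of A: "abc" -> ["a","b","c"]
def splitLine (line : String) : List String :=
  line.toList.map (fun c => String.mk [c])

-- body of A's inner `for i in range(len(split))` loop
def innerStep (split : List String) (cols : List (List String)) (i : Nat) : List (List String) :=
  let cols := if i < cols.length then cols else cols ++ [[]]
  cols.modify i (fun col => col ++ [split.getD i ""])

def generateReportColumns (report : List String) : List (List String) :=
  report.foldl (fun reportColumns line =>
    let split := splitLine line
    (List.range split.length).foldl (innerStep split) reportColumns) []

-- ===== PORT B =====
def generateReportColumns_alt (report : List String) : List (List String) :=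
  let maxlen := report.foldl (fun m line => max m line.toList.length) 0
  (List.range maxlen).map (fun i =>
    report.filterMap (fun line => (line.toList[i]?).map (fun c => String.mk [c])))

-- ===== PRECONDITION & SPEC =====
def Spec_generateReportColumns (report : List String) (out : List (List String)) : Prop := out = generateReportColumns_alt report
instance (report : List String) (out : List (List String)) : Decidable (Spec_generateReportColumns report out) := by unfold Spec_generateReportColumns; infer_instance

-- ===== CLAIM (what is proved, stated in full; the proofs are below) =====
def Claim_equal_generateReportColumns : Prop := ∀ (report : List String), Dom_generateReportColumns report → Spec_generateReportColumns report (generateReportColumns report)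

-- ===== LEMMAS AND PROOFS =====

def maxLenR (r : List String) : Nat := r.foldl (fun m line => max m line.toList.length) 0

def colOfR (r : List String) (i : Nat) : List String :=
  r.filterMap (fun line => (line.toList[i]?).map (fun c => String.mk [c]))

def shapeB (r : List String) : List (List String) :=
  (List.range (maxLenR r)).map (colOfR r)

theorem alt_eq_shapeB (r : List String) : generateReportColumns_alt r = shapeB r := rfl

theorem maxLenR_append (r : List String) (l : String) :
    maxLenR (r ++ [l]) = max (maxLenR r) l.toList.length := by
  simp [maxLenR, List.foldl_append]

theorem len_le_maxLenR_aux (r : List String) (a : Nat) :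
    a ≤ r.foldl (fun m line => max m line.toList.length) a ∧
    ∀ l ∈ r, l.toList.length ≤ r.foldl (fun m line => max m line.toList.length) a := by
  induction r generalizing a with
  | nil => simp
  | cons x xs ih =>
    obtain ⟨h1, h2⟩ := ih (max a x.toList.length)
    refine ⟨le_trans (le_max_left _ _) h1, ?_⟩
    intro l hl
    rcases List.mem_cons.mp hl with rfl | hmem
    · exact le_trans (le_max_right a _) h1
    · exact h2 _ hmem

theorem colOfR_eq_nil (r : List String) (i : Nat) (h : maxLenR r ≤ i) : colOfR r i = [] := by
  unfold colOfR
  rw [List.filterMap_eq_nil_iff]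
  intro l hl
  have := (len_le_maxLenR_aux r 0).2 l hl
  have : l.toList.length ≤ i := le_trans this h
  simp [List.getElem?_eq_none this]

theorem colOfR_append (r : List String) (l : String) (i : Nat) :
    colOfR (r ++ [l]) i = colOfR r i ++ ((l.toList[i]?).map (fun c => String.mk [c])).toList := by
  cases h : l.toList[i]? <;>
    simp [colOfR, List.filterMap_append, List.filterMap_cons, h]

-- getD-vs-getElem? bridge for the B-shaped column list
theorem shape_getD (r : List String) (j : Nat) :
    (shapeB r).getD j [] = colOfR r j := by
  by_cases h : j < maxLenR r
  · simp [shapeB, List.getD, List.getElem?_map, List.getElem?_range h]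
  · have h' : maxLenR r ≤ j := Nat.le_of_not_lt h
    rw [colOfR_eq_nil r j h']
    simp [shapeB, List.getD, List.getElem?_eq_none, h']

theorem innerStep_eq (split : List String) (c : List (List String)) (n : Nat) :
    innerStep split c n =
      (if n < c.length then c else c ++ [[]]).modify n (fun col => col ++ [split.getD n ""]) := rfl

-- characterisation of A's inner loop over range n
theorem inner_length (split : List String) (cols : List (List String)) (n : Nat) :
    ((List.range n).foldl (innerStep split) cols).length = max cols.length n := by
  induction n with
  | zero => simp
  | succ n ih =>
    rw [List.range_succ, List.foldl_append]
    simp only [List.foldl_cons, List.foldl_nil]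
    set c := (List.range n).foldl (innerStep split) cols with hc
    rw [innerStep_eq]
    by_cases h : n < c.length
    · rw [if_pos h, List.length_modify]
      rw [ih] at h ⊢
      omega
    · rw [if_neg h, List.length_modify, List.length_append]
      rw [ih] at h ⊢
      simp only [List.length_cons, List.length_nil]
      omega

theorem inner_get (split : List String) (cols : List (List String)) (n j : Nat) :
    ((List.range n).foldl (innerStep split) cols)[j]? =
      if j < n then some (cols.getD j [] ++ [split.getD j ""]) else cols[j]? := by
  induction n with
  | zero => simp
  | succ n ih =>
    rw [List.range_succ, List.foldl_append]
    simp only [List.foldl_cons, List.foldl_nil]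
    set c := (List.range n).foldl (innerStep split) cols with hc
    rw [innerStep_eq]
    have hlen : c.length = max cols.length n := inner_length split cols n
    by_cases hin : n < c.length
    · rw [if_pos hin]
      rw [List.getElem?_modify]
      rcases Nat.lt_trichotomy j n with hj | hj | hj
      · have : n ≠ j := by omega
        rw [ih]
        simp [hj, this, Nat.lt_succ_of_lt hj]
      · subst hj
        have hcols : j < cols.length := by omega
        rw [ih]
        simp only [Nat.lt_irrefl, if_false]
        rw [List.getElem?_eq_getElem hcols]
        simp [List.getD, List.getElem?_eq_getElem hcols, Nat.lt_succ_self]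
      · have h1 : n ≠ j := by omega
        have h2 : ¬ j < n := by omega
        have h3 : ¬ j < n + 1 := by omega
        rw [ih]
        simp [h1, h2, h3]
    · have hle : cols.length ≤ n := by omega
      have hcn : c.length = n := by omega
      rw [if_neg hin]
      rw [List.getElem?_modify]
      rcases Nat.lt_trichotomy j n with hj | hj | hj
      · have : n ≠ j := by omega
        rw [List.getElem?_append_left (by omega), ih]
        simp [hj, this, Nat.lt_succ_of_lt hj]
      · subst hj
        have : (c ++ [[]])[j]? = some [] := by
          rw [List.getElem?_append_right (by omega)]
          simp [hcn]
        rw [this]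
        have hd : cols.getD j [] = [] := List.getD_eq_default _ _ (by omega)
        simp [hd, Nat.lt_succ_self, List.getElem?_eq_none hle]
      · have h1 : n ≠ j := by omega
        have h3 : ¬ j < n + 1 := by omega
        have : (c ++ [[]])[j]? = none := by
          rw [List.getElem?_eq_none]
          simp [hcn]; omega
        rw [this]
        have : cols[j]? = none := List.getElem?_eq_none (by omega)
        simp [h1, h3, this]

-- split[j] of A equals the character picked by B's column builder
theorem split_getD (line : String) (j : Nat) (hj : j < line.toList.length) :
    ((splitLine line).getD j "") = String.mk [line.toList.getD j ' '] := by
  simp [splitLine, List.getD, List.getElem?_map, List.getElem?_eq_getElem hj]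

-- one A-step applied to B's shape produces B's shape of the extended report
theorem step_shape (r : List String) (line : String) :
    (List.range (splitLine line).length).foldl (innerStep (splitLine line)) (shapeB r) =
      shapeB (r ++ [line]) := by
  set n := line.length with hn
  have htl : line.toList.length = n := String.length_toList
  have hsplit : (splitLine line).length = n := by simp [splitLine, ← hn]
  have hshape : (shapeB r).length = maxLenR r := by simp [shapeB]
  apply List.ext_getElem?
  intro j
  rw [inner_get, hsplit]
  have hRj : (shapeB (r ++ [line]))[j]? =
      if j < max (maxLenR r) n then some (colOfR (r ++ [line]) j) else none := by
    unfold shapeB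
    rw [maxLenR_append, htl]
    by_cases h : j < max (maxLenR r) n
    · rw [List.getElem?_map, List.getElem?_range h, if_pos h]
      rfl
    · rw [if_neg h, List.getElem?_eq_none]
      simp only [List.length_map, List.length_range]
      omega
  rw [hRj]
  by_cases hjn : j < n
  · have hmax : j < max (maxLenR r) n := by omega
    have hjt : j < line.toList.length := by omega
    have hchar : line.toList[j]? = some (line.toList.getD j ' ') := by
      simp [List.getD, List.getElem?_eq_getElem hjt]
    rw [shape_getD, split_getD line j hjt, if_pos hjn, if_pos hmax, colOfR_append, hchar]
    simp only [Option.map_some, Option.toList_some]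
  · have hchar : line.toList[j]? = none := List.getElem?_eq_none (by omega)
    rw [colOfR_append]
    simp only [hjn, if_false, hchar, Option.map_none, Option.toList_none, List.append_nil]
    by_cases h : j < maxLenR r
    · have hmax : j < max (maxLenR r) n := by omega
      rw [if_pos hmax]
      unfold shapeB
      rw [List.getElem?_map, List.getElem?_range h]
      rfl
    · have hmax : ¬ j < max (maxLenR r) n := by omega
      rw [if_neg hmax, List.getElem?_eq_none (by omega : (shapeB r).length ≤ j)]

theorem ports_agree (report : List String) :
    generateReportColumns report = generateReportColumns_alt report := by
  rw [alt_eq_shapeB]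
  induction report using List.reverseRecOn with
  | nil => rfl
  | append_singleton r line ih =>
    unfold generateReportColumns at ih ⊢
    rw [List.foldl_append]
    simp only [List.foldl_cons, List.foldl_nil]
    rw [ih]
    exact step_shape r line

-- ===== VERDICT (by name: the statement is the Claim_ definition above) =====
theorem generateReportColumns_spec : Claim_equal_generateReportColumns := by
  intro report _
  unfold Spec_generateReportColumns
  exact ports_agree report
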